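-- pv_equiv track=rewrite | github.com/chapel/comfy-ecaj-nodes | lib/lora/sdxl_clip.py | _tokenize_clip_lora_path
-- ===== SOURCE A (Python) =====
-- _CLIP_COMPOUND_TOKENS = [
--     # Transformer structure
--     ("text_model", "text_model"),
--     ("encoder", "encoder"),
--     ("layers", "layers"),
--     # Attention components
--     ("self_attn", "self_attn"),
--     ("k_proj", "k_proj"),
--     ("v_proj", "v_proj"),
--     ("q_proj", "q_proj"),
--     ("out_proj", "out_proj"),
--     # MLP components
--     ("mlp", "mlp"),
--     ("fc1", "fc1"),
--     ("fc2", "fc2"),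
--     # Layer norms
--     ("layer_norm1", "layer_norm1"),
--     ("layer_norm2", "layer_norm2"),
--     ("final_layer_norm", "final_layer_norm"),
--     # Embeddings
--     ("embeddings", "embeddings"),
--     ("token_embedding", "token_embedding"),
--     ("position_embedding", "position_embedding"),
--     # CLIP-G specific
--     ("text_projection", "text_projection"),
-- ]
--
-- def _tokenize_clip_lora_path(path: str) -> list[str]:
--     """Tokenize a CLIP LoRA path, preserving compound identifiers.
--
--     Splits on underscores but keeps known compound tokens together.
--
--     Args:
--         path: Layer path like 'text_model_encoder_layers_0_self_attn_k_proj'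
--
--     Returns:
--         List of tokens like ['text_model', 'encoder', 'layers', '0', 'self_attn', 'k_proj']
--     """
--     tokens: list[str] = []
--     remaining = path
--
--     while remaining:
--         # Try to match a compound token at the current position
--         matched = False
--         for pattern, _ in _CLIP_COMPOUND_TOKENS:
--             if remaining.startswith(pattern):
--                 # Check it's followed by underscore, end of string, or digit boundary
--                 rest = remaining[len(pattern) :]
--                 if rest == "" or rest.startswith("_"):
--                     tokens.append(pattern)
--                     remaining = rest[1:] if rest.startswith("_") else ""
--                     matched = True
--                     break
--
--         if not matched:
--             # Take characters up to the next underscore as a single token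
--             if "_" in remaining:
--                 idx = remaining.index("_")
--                 tokens.append(remaining[:idx])
--                 remaining = remaining[idx + 1 :]
--             else:
--                 tokens.append(remaining)
--                 remaining = ""
--
--     return tokens
-- ===== SOURCE B (Python) =====
-- _CLIP_COMPOUND_TOKENS = [
--     # Transformer structure
--     ("text_model", "text_model"),
--     ("encoder", "encoder"),
--     ("layers", "layers"),
--     # Attention components
--     ("self_attn", "self_attn"),
--     ("k_proj", "k_proj"),
--     ("v_proj", "v_proj"),
--     ("q_proj", "q_proj"),
--     ("out_proj", "out_proj"),
--     # MLP components
--     ("mlp", "mlp"),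
--     ("fc1", "fc1"),
--     ("fc2", "fc2"),
--     # Layer norms
--     ("layer_norm1", "layer_norm1"),
--     ("layer_norm2", "layer_norm2"),
--     ("final_layer_norm", "final_layer_norm"),
--     # Embeddings
--     ("embeddings", "embeddings"),
--     ("token_embedding", "token_embedding"),
--     ("position_embedding", "position_embedding"),
--     # CLIP-G specific
--     ("text_projection", "text_projection"),
-- ]
--
-- # Each compound token pre-split into its underscore segments, in the same order.
-- _COMPOUND_SEGS = [tok.split("_") for tok, _ in _CLIP_COMPOUND_TOKENS]
--
--
-- def _tokenize_clip_lora_path(path: str) -> list[str]: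
--     """Split once into underscore segments, then walk the segment list,
--     greedily re-joining any run of segments that forms a known compound token."""
--     if path == "":
--         return []
--     segs = path.split("_")
--     if path.endswith("_"):
--         segs.pop()  # a trailing separator yields no final token
--     tokens: list[str] = []
--     i = 0
--     n = len(segs)
--     while i < n:
--         for comp in _COMPOUND_SEGS:
--             if segs[i : i + len(comp)] == comp:
--                 tokens.append("_".join(comp))
--                 i += len(comp)
--                 break
--         else:
--             tokens.append(segs[i])
--             i += 1
--     return tokens
-- ===== Notes on version B (the rewrite author's own statement) =====
-- stated objective: alternative
-- what changed: A repeatedly scans the remaining string with per-pattern startswith and boundary checks and re-slices it; B splits the path into its underscore segments once and walks the segment list, re-joining any run of segments that equals a pre-split compound token.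
import Mathlib
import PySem

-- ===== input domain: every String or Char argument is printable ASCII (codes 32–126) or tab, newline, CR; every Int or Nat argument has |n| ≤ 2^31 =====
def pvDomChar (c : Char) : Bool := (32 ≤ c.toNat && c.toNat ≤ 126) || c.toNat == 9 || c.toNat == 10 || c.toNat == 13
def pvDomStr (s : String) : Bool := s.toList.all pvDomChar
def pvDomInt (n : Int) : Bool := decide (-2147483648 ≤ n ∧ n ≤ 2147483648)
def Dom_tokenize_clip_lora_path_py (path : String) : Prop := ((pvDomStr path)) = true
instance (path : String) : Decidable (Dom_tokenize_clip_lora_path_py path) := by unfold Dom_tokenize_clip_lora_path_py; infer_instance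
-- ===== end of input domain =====

-- B re-implements the tokenizer by splitting the path into its '_'-segments once and
-- walking the segment list (different decomposition, same return value everywhere).

-- ===== PORT A =====
-- the module constant _CLIP_COMPOUND_TOKENS (second components are unused by the algorithm, kept for fidelity)
def clipCompoundTokens : List (String × String) := [
  ("text_model", "text_model"), ("encoder", "encoder"), ("layers", "layers"),
  ("self_attn", "self_attn"), ("k_proj", "k_proj"), ("v_proj", "v_proj"),
  ("q_proj", "q_proj"), ("out_proj", "out_proj"),
  ("mlp", "mlp"), ("fc1", "fc1"), ("fc2", "fc2"),
  ("layer_norm1", "layer_norm1"), ("layer_norm2", "layer_norm2"),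
  ("final_layer_norm", "final_layer_norm"),
  ("embeddings", "embeddings"), ("token_embedding", "token_embedding"),
  ("position_embedding", "position_embedding"), ("text_projection", "text_projection")]

-- A's inner `for pattern, _ in _CLIP_COMPOUND_TOKENS` loop: first pattern that is a prefix of
-- `remaining` AND is followed by end-of-string or '_'; returns (pattern, remaining after it).
-- Strings are handled as List Char (exact on the ASCII domain); `rest.tail` is
-- `rest[1:] if rest.startswith("_") else ""` (both branches of A's assignment).
def aFindCompound : List (String × String) → List Char → Option (String × List Char)
  | [], _ => none
  | (pat, _) :: ps, rem =>
    if pat.toList <+: rem then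
      let rest := rem.drop pat.toList.length
      if rest = [] ∨ rest.head? = some '_' then some (pat, rest.tail)
      else aFindCompound ps rem
    else aFindCompound ps rem

-- termination helper for aLoop: a matched pattern is nonempty, so `remaining` shrinks
theorem aFindCompound_lt (ps : List (String × String)) (rem : List Char) (pat : String)
    (r : List Char) (hne : ∀ q ∈ ps, q.1.toList ≠ []) (h : aFindCompound ps rem = some (pat, r)) :
    r.length < rem.length := by
  induction ps with
  | nil => simp [aFindCompound] at h
  | cons q ps ih =>
    obtain ⟨p0, p1⟩ := q
    simp only [aFindCompound] at h
    split_ifs at h with h1 h2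
    · cases h
      have hp : pat.toList ≠ [] := hne (pat, p1) (by simp)
      have hlen : pat.toList.length ≤ rem.length := h1.length_le
      have hp1 : 1 ≤ pat.toList.length := by
        cases hL : pat.toList with
        | nil => exact absurd hL hp
        | cons a l => simp
      simp only [List.length_tail, List.length_drop]
      omega
    · exact ih (fun q hq => hne q (by simp [hq])) h
    · exact ih (fun q hq => hne q (by simp [hq])) h

-- A's while-loop over `remaining`
def aLoop (rem : List Char) : List String :=
  if h0 : rem = [] then []
  else
    match h : aFindCompound clipCompoundTokens rem with
    | some (pat, rem') => pat :: aLoop rem'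
    | none =>
      -- "_" in remaining → take remaining[:idx] (idx = first '_'), continue with remaining[idx+1:]
      if '_' ∈ rem then
        String.ofList (rem.takeWhile (· ≠ '_')) :: aLoop ((rem.dropWhile (· ≠ '_')).tail)
      else [String.ofList rem]
termination_by rem.length
decreasing_by
  · exact aFindCompound_lt _ _ _ _ (by decide) h
  · have h1 : (rem.dropWhile (· ≠ '_')).length ≤ rem.length := List.length_dropWhile_le _ _
    have h2 : 0 < rem.length := List.length_pos_of_ne_nil h0
    simp only [List.length_tail]
    omega

def tokenize_clip_lora_path_py (path : String) : List String := aLoop path.toList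

-- ===== PORT B =====
-- Source B: _COMPOUND_SEGS = [tok.split("_") for tok, _ in _CLIP_COMPOUND_TOKENS]
def compoundSegs : List (List (List Char)) :=
  clipCompoundTokens.map (fun t => PySem.Chars.splitOn t.1.toList ['_'])

-- Source B's inner `for comp in _COMPOUND_SEGS` loop: first compound whose segment list is a
-- prefix of the current segment suffix (segs[i:i+len(comp)] == comp)
def bFindComp : List (List (List Char)) → List (List Char) → Option (List (List Char))
  | [], _ => none
  | c :: cs, segs => if c <+: segs then some c else bFindComp cs segs

theorem bFindComp_mem (cs : List (List (List Char))) (segs c : List (List Char))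
    (h : bFindComp cs segs = some c) : c ∈ cs ∧ c <+: segs := by
  induction cs with
  | nil => simp [bFindComp] at h
  | cons d ds ih =>
    simp only [bFindComp] at h
    split_ifs at h with h1
    · cases h; exact ⟨by simp, h1⟩
    · obtain ⟨hm, hp⟩ := ih h; exact ⟨by simp [hm], hp⟩

-- Source B's while-loop over the index i, as recursion on the segment suffix
def bWalk (segs : List (List Char)) : List String :=
  match segs with
  | [] => []
  | s :: rest =>
    match h : bFindComp compoundSegs (s :: rest) with
    | some c => String.ofList (PySem.Chars.join ['_'] c) :: bWalk ((s :: rest).drop c.length)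
    | none => String.ofList s :: bWalk rest
termination_by segs.length
decreasing_by
  · obtain ⟨hm, hp⟩ := bFindComp_mem _ _ _ h
    have hc : c ≠ [] := (by decide : ∀ x ∈ compoundSegs, x ≠ []) c hm
    have h1 : 1 ≤ c.length := by
      cases hL : c with
      | nil => exact absurd hL hc
      | cons a l => simp
    simp only [List.length_drop, List.length_cons]
    omega
  · simp

def tokenize_clip_lora_path_py_alt (path : String) : List String :=
  if path = "" then []
  else
    let segs0 := PySem.Chars.splitOn path.toList ['_']
    -- if path.endswith("_"): segs.pop()
    let segs := if PySem.Chars.endswith path.toList ['_'] then segs0.dropLast else segs0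
    bWalk segs

-- ===== PRECONDITION & SPEC =====
def Spec_tokenize_clip_lora_path_py (path : String) (out : List String) : Prop := out = tokenize_clip_lora_path_py_alt path
instance (path : String) (out : List String) : Decidable (Spec_tokenize_clip_lora_path_py path out) := by unfold Spec_tokenize_clip_lora_path_py; infer_instance

-- ===== CLAIM (what is proved, stated in full; the proofs are below) =====
def Claim_equal_tokenize_clip_lora_path_py : Prop := ∀ (path : String), Dom_tokenize_clip_lora_path_py path → Spec_tokenize_clip_lora_path_py path (tokenize_clip_lora_path_py path)

-- ===== LEMMAS AND PROOFS =====

-- proof-side recursive characterization of splitting on '_'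
def consHead (c : Char) : List (List Char) → List (List Char)
  | [] => [[c]]
  | s :: r => (c :: s) :: r

def splitU : List Char → List (List Char)
  | [] => [[]]
  | c :: cs => if c = '_' then [] :: splitU cs else consHead c (splitU cs)

theorem splitU_ne_nil (cs : List Char) : splitU cs ≠ [] := by
  cases cs with
  | nil => simp [splitU]
  | cons c cs =>
    simp only [splitU]
    split_ifs
    · simp
    · cases h : splitU cs <;> simp [consHead]

def preHead (pre : List Char) : List (List Char) → List (List Char)
  | [] => [pre]
  | s :: r => (pre ++ s) :: r

theorem splitOn_go_eq (l : List Char) : ∀ (fuel : Nat) (cur : List Char) (acc : List (List Char)),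
    l.length < fuel →
    PySem.Chars.splitOn.go ['_'] fuel l cur acc = acc.reverse ++ preHead cur.reverse (splitU l) := by
  induction l with
  | nil =>
    intro fuel cur acc hf
    cases fuel with
    | zero => omega
    | succ f => rw [PySem.Chars.splitOn.go.eq_def]; simp [splitU, preHead]
  | cons c l ih =>
    intro fuel cur acc hf
    cases fuel with
    | zero => simp at hf
    | succ f =>
      rw [PySem.Chars.splitOn.go.eq_def]
      simp only []
      by_cases hc : c = '_'
      · subst hc
        have hpre : List.isPrefixOf ['_'] ('_' :: l) = true := by simp [List.isPrefixOf]
        rw [if_pos hpre]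
        have hdrop : List.drop (['_'].length) ('_' :: l) = l := by simp
        rw [hdrop, ih f [] (cur.reverse :: acc) (by simp at hf ⊢; omega)]
        simp only [splitU, if_pos rfl, List.reverse_cons, List.reverse_nil]
        cases h : splitU l with
        | nil => exact absurd h (splitU_ne_nil l)
        | cons s r => simp [preHead]
      · have hpre : List.isPrefixOf ['_'] (c :: l) = false := by
          simp [List.isPrefixOf]; exact fun h => absurd h.symm hc
        rw [if_neg (by simp [hpre])]
        rw [ih f (c :: cur) acc (by simp at hf ⊢; omega)]
        simp only [splitU, if_neg hc, List.reverse_cons]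
        cases h : splitU l with
        | nil => exact absurd h (splitU_ne_nil l)
        | cons s r => simp [preHead, consHead]

theorem splitOn_eq_splitU (cs : List Char) : PySem.Chars.splitOn cs ['_'] = splitU cs := by
  show PySem.Chars.splitOn.go ['_'] (cs.length + 1) cs [] [] = splitU cs
  rw [splitOn_go_eq cs (cs.length + 1) [] [] (by omega)]
  cases h : splitU cs with
  | nil => exact absurd h (splitU_ne_nil cs)
  | cons s r => simp [preHead]

def joinU (L : List (List Char)) : List Char := PySem.Chars.join ['_'] L

-- the loop state of A as a function of the segment suffix of B:
-- `t` records whether the original path ended in '_' (A then still has that '_' pending)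
def rep (segs : List (List Char)) (t : Bool) : List Char :=
  joinU segs ++ (if segs ≠ [] ∧ t = true then ['_'] else [])

theorem rep_nil (t : Bool) : rep [] t = [] := by
  simp [rep, joinU, PySem.Chars.join_nil]

theorem joinU_consHead (c : Char) (s0 : List Char) (r : List (List Char)) :
    joinU (consHead c (s0 :: r)) = c :: joinU (s0 :: r) := by
  cases r with
  | nil => simp [consHead, joinU, PySem.Chars.join_singleton]
  | cons y r' => simp [consHead, joinU, PySem.Chars.join_cons_cons]

theorem rep_cons (s : List Char) (rest : List (List Char)) (t : Bool) :
    rep (s :: rest) t = s ++ (if rest = [] ∧ t = false then [] else '_' :: rep rest t) := by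
  cases rest with
  | nil =>
    cases t <;> simp [rep, joinU, PySem.Chars.join_singleton, PySem.Chars.join_nil]
  | cons r rs =>
    simp [rep, joinU, PySem.Chars.join_cons_cons]

-- the tail `r` of a loop state after its leading segment: empty or '_'-headed
theorem rep_cons_shape (rest : List (List Char)) (t : Bool) :
    (if rest = [] ∧ t = false then ([] : List Char) else '_' :: rep rest t) = [] ∨
    (if rest = [] ∧ t = false then ([] : List Char) else '_' :: rep rest t).head? = some '_' := by
  split_ifs <;> simp

theorem splitU_no_us (cs : List Char) : ∀ s ∈ splitU cs, '_' ∉ s := by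
  induction cs with
  | nil => simp [splitU]
  | cons c cs ih =>
    by_cases hc : c = '_'
    · subst hc; simpa [splitU] using ih
    · simp only [splitU, if_neg hc]
      cases hX : splitU cs with
      | nil => exact absurd hX (splitU_ne_nil cs)
      | cons s0 r =>
        intro s hs
        rcases List.mem_cons.mp (by simpa [consHead] using hs) with h | h
        · subst h
          intro hm
          rcases List.mem_cons.mp hm with h' | h'
          · exact hc h'.symm
          · exact ih s0 (by simp [hX]) h'
        · exact ih s (by simp [hX, h]) 

theorem joinU_splitU (cs : List Char) : joinU (splitU cs) = cs := by
  induction cs with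
  | nil => simp [splitU, joinU, PySem.Chars.join_singleton]
  | cons c cs ih =>
    by_cases hc : c = '_'
    · subst hc
      simp only [splitU, if_pos rfl]
      cases hX : splitU cs with
      | nil => exact absurd hX (splitU_ne_nil cs)
      | cons s0 r =>
        rw [hX] at ih
        simp [joinU, PySem.Chars.join_cons_cons, ← ih]
    · simp only [splitU, if_neg hc]
      cases hX : splitU cs with
      | nil => exact absurd hX (splitU_ne_nil cs)
      | cons s0 r =>
        rw [hX] at ih
        rw [joinU_consHead, ih]

theorem splitU_concat_us (l : List Char) : splitU (l ++ ['_']) = splitU l ++ [[]] := by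
  induction l with
  | nil => simp [splitU]
  | cons c l ih =>
    by_cases hc : c = '_'
    · subst hc; simp [List.cons_append, splitU, ih]
    · simp only [List.cons_append, splitU, if_neg hc, ih]
      cases hX : splitU l with
      | nil => exact absurd hX (splitU_ne_nil l)
      | cons s0 r => simp [consHead]

theorem splitU_getLast : ∀ (cs : List Char), cs ≠ [] → ¬ ['_'] <:+ cs →
    (splitU cs).getLast? ≠ some [] := by
  intro cs
  induction cs with
  | nil => simp
  | cons c cs ih =>
    intro _ h1
    by_cases hc : c = '_'
    · subst hc
      have hcs : cs ≠ [] := by rintro rfl; exact h1 ⟨[], rfl⟩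
      have h1' : ¬ ['_'] <:+ cs := by
        rintro ⟨u, hu⟩; exact h1 ⟨'_' :: u, by simp [← hu]⟩
      have hrec := ih hcs h1'
      simp only [splitU, eq_self_iff_true, if_true]
      cases hX : splitU cs with
      | nil => exact absurd hX (splitU_ne_nil cs)
      | cons s r => rw [List.getLast?_cons_cons]; rw [hX] at hrec; exact hrec
    · simp only [splitU, if_neg hc]
      cases hcs : cs with
      | nil => simp [splitU, consHead]
      | cons d ds =>
        have h1' : ¬ ['_'] <:+ cs := by
          rintro ⟨u, hu⟩; exact h1 ⟨c :: u, by simp [← hcs, ← hu]⟩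
        have hrec := ih (by simp [hcs]) h1'
        rw [← hcs]
        cases hX : splitU cs with
        | nil => exact absurd hX (splitU_ne_nil cs)
        | cons s r =>
          cases r with
          | nil => simp [consHead]
          | cons y r' =>
            rw [hX] at hrec
            simpa [consHead, List.getLast?_cons_cons] using hrec

-- a '_'-free candidate matches a '_'-free segment followed by an end-or-'_' tail iff they are equal
theorem seg_prefix_iff (x : List Char) : ∀ (s r : List Char), '_' ∉ x → '_' ∉ s →
    (r = [] ∨ r.head? = some '_') →
    ((x <+: s ++ r ∧ (((s ++ r).drop x.length) = [] ∨ ((s ++ r).drop x.length).head? = some '_')) ↔ x = s) := by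
  induction x with
  | nil =>
    intro s r hx hs hr
    cases s with
    | nil => simp [hr]
    | cons b s' =>
      have hb : b ≠ '_' := fun h => hs (by simp [h])
      simp [hb]
  | cons a x' ih =>
    intro s r hx hs hr
    have ha : a ≠ '_' := fun h => hx (by simp [h])
    cases s with
    | nil =>
      simp only [List.nil_append]
      rcases hr with rfl | hr
      · simp
      · cases r with
        | nil => simp at hr
        | cons u r' =>
          have hu : u = '_' := by simpa using hr
          subst hu
          simp [List.cons_prefix_cons, ha]
    | cons b s' =>
      by_cases hab : a = b
      · subst hab
        have hs' : '_' ∉ s' := fun h => hs (by simp [h])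
        have hx' : '_' ∉ x' := fun h => hx (by simp [h])
        have hrec := ih s' r hx' hs' hr
        simp only [List.cons_append, List.cons_prefix_cons, List.length_cons,
          List.drop_succ_cons, List.cons.injEq, true_and]
        exact hrec
      · simp [List.cons_prefix_cons, hab]

-- a candidate of shape x ++ '_' :: q eats exactly the first segment plus the separator
theorem seg_prefix_mid (x : List Char) : ∀ (s q r : List Char), '_' ∉ x → '_' ∉ s →
    (r = [] ∨ r.head? = some '_') →
    ((x ++ '_' :: q <+: s ++ r) ↔ (x = s ∧ r ≠ [] ∧ q <+: r.tail)) := by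
  induction x with
  | nil =>
    intro s q r hx hs hr
    cases s with
    | nil =>
      rcases hr with rfl | hr
      · simp
      · cases r with
        | nil => simp at hr
        | cons u r' =>
          have hu : u = '_' := by simpa using hr
          subst hu
          simp [List.cons_prefix_cons]
    | cons b s' =>
      have hb : b ≠ '_' := fun h => hs (by simp [h])
      simp only [List.nil_append, List.cons_append, List.cons_prefix_cons]
      constructor
      · rintro ⟨h, -⟩; exact absurd h.symm hb
      · rintro ⟨h, -⟩; exact absurd h (by simp)
  | cons a x' ih =>
    intro s q r hx hs hr
    have ha : a ≠ '_' := fun h => hx (by simp [h])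
    cases s with
    | nil =>
      simp only [List.nil_append]
      rcases hr with rfl | hr
      · simp
      · cases r with
        | nil => simp at hr
        | cons u r' =>
          have hu : u = '_' := by simpa using hr
          subst hu
          simp [List.cons_prefix_cons, ha]
    | cons b s' =>
      by_cases hab : a = b
      · subst hab
        have hs' : '_' ∉ s' := fun h => hs (by simp [h])
        have hx' : '_' ∉ x' := fun h => hx (by simp [h])
        have hrec := ih s' q r hx' hs' hr
        simp only [List.cons_append, List.cons_prefix_cons, List.cons.injEq, true_and]
        exact hrec
      · simp [List.cons_prefix_cons, hab]

theorem takeWhile_seg (s r : List Char) (hs : '_' ∉ s) (hr : r = [] ∨ r.head? = some '_') :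
    (s ++ r).takeWhile (· ≠ '_') = s ∧ (s ++ r).dropWhile (· ≠ '_') = r := by
  induction s with
  | nil =>
    rcases hr with rfl | hr
    · simp
    · cases r with
      | nil => simp at hr
      | cons u r' =>
        have hu : u = '_' := by simpa using hr
        subst hu
        simp [List.takeWhile_cons, List.dropWhile_cons]
  | cons c s' ih =>
    have hc : c ≠ '_' := fun h => hs (by simp [h])
    obtain ⟨h1, h2⟩ := ih (fun h => hs (by simp [h]))
    simp only [ne_eq, decide_not] at h1 h2 ⊢
    simp [List.takeWhile_cons, List.dropWhile_cons, hc, h1, h2]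

theorem drop_app_cons (x w J : List Char) (ch : Char) :
    (x ++ ch :: w).drop (x ++ ch :: J).length = w.drop J.length := by
  rw [List.drop_append]
  have h1 : x.drop (x ++ ch :: J).length = [] :=
    List.drop_eq_nil_of_le (by simp [List.length_append])
  have h2 : (x ++ ch :: J).length - x.length = J.length + 1 := by
    simp [List.length_append]
  rw [h1, h2, List.drop_succ_cons, List.nil_append]

theorem joinU_cons_cons (x y : List Char) (c'' : List (List Char)) :
    joinU (x :: y :: c'') = x ++ '_' :: joinU (y :: c'') := by
  simp [joinU, PySem.Chars.join_cons_cons]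

-- compound-level: the string-prefix + boundary test of A is the segment-prefix test of B
theorem comp_match_iff (c : List (List Char)) : ∀ (segs : List (List Char)) (t : Bool),
    c ≠ [] → (∀ x ∈ c, x ≠ [] ∧ '_' ∉ x) → (∀ s ∈ segs, '_' ∉ s) →
    ((joinU c <+: rep segs t ∧
      (((rep segs t).drop (joinU c).length) = [] ∨ ((rep segs t).drop (joinU c).length).head? = some '_'))
     ↔ c <+: segs) := by
  induction c with
  | nil => intro segs t hc _ _; exact absurd rfl hc
  | cons x c' ih =>
    intro segs t _ hcs hseg
    obtain ⟨hxne, hxus⟩ := hcs x (by simp)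
    cases segs with
    | nil =>
      rw [rep_nil]
      constructor
      · rintro ⟨hp, -⟩
        exfalso
        have hj : joinU (x :: c') = [] := List.prefix_nil.mp hp
        cases c' with
        | nil => exact hxne (by simpa [joinU, PySem.Chars.join_singleton] using hj)
        | cons y c'' => simp [joinU_cons_cons] at hj
      · intro hp; exact absurd (List.prefix_nil.mp hp) (by simp)
    | cons s rest =>
      have hs : '_' ∉ s := hseg s (by simp)
      rw [rep_cons]
      have hr := rep_cons_shape rest t
      cases c' with
      | nil =>
        have hj : joinU [x] = x := PySem.Chars.join_singleton _ _
        rw [hj]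
        rw [seg_prefix_iff x s _ hxus hs hr]
        simp [List.cons_prefix_cons]
      | cons y c'' =>
        rw [joinU_cons_cons]
        by_cases hxs : x = s
        · subst hxs
          by_cases hre : rest = [] ∧ t = false
          · rw [if_pos hre]
            constructor
            · rintro ⟨hp, -⟩
              rw [seg_prefix_mid x x _ [] hxus hxus (Or.inl rfl)] at hp
              exact absurd rfl hp.2.1
            · intro hp
              have := (List.cons_prefix_cons.mp hp).2
              rw [hre.1] at this
              exact absurd (List.prefix_nil.mp this) (by simp)
          · rw [if_neg hre]
            have hdrop := drop_app_cons x (rep rest t) (joinU (y :: c'')) '_'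
            rw [hdrop]
            rw [seg_prefix_mid x x (joinU (y :: c'')) ('_' :: rep rest t) hxus hxus (by simp)]
            have hrec := ih rest t (by simp) (fun z hz => hcs z (by simp [hz]))
              (fun z hz => hseg z (by simp [hz]))
            simp only [List.cons_prefix_cons, true_and, List.tail_cons]
            rw [← hrec]
            simp
        · constructor
          · rintro ⟨hp, -⟩
            rw [seg_prefix_mid x s (joinU (y :: c'')) _ hxus hs hr] at hp
            exact absurd hp.1 hxs
          · intro hp; exact absurd (List.cons_prefix_cons.mp hp).1 hxs

theorem comp_match_tail (c : List (List Char)) : ∀ (segs : List (List Char)) (t : Bool),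
    c ≠ [] → (∀ x ∈ c, x ≠ [] ∧ '_' ∉ x) → (∀ s ∈ segs, '_' ∉ s) → c <+: segs →
    ((rep segs t).drop (joinU c).length).tail = rep (segs.drop c.length) t := by
  induction c with
  | nil => intro segs t hc _ _ _; exact absurd rfl hc
  | cons x c' ih =>
    intro segs t _ hcs hseg hpre
    cases segs with
    | nil => exact absurd (List.prefix_nil.mp hpre) (by simp)
    | cons s rest =>
      obtain ⟨hxs, hpre'⟩ := List.cons_prefix_cons.mp hpre
      subst hxs
      rw [rep_cons]
      cases c' with
      | nil =>
        have hj : joinU [x] = x := PySem.Chars.join_singleton _ _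
        rw [hj, List.drop_left]
        by_cases hre : rest = [] ∧ t = false
        · rw [if_pos hre, hre.1]
          simp [rep_nil]
        · rw [if_neg hre]
          simp
      | cons y c'' =>
        have hrne : rest ≠ [] := by
          intro h
          rw [h] at hpre'
          exact absurd (List.prefix_nil.mp hpre') (by simp)
        rw [if_neg (by simp [hrne])]
        rw [joinU_cons_cons, drop_app_cons]
        rw [ih rest t (by simp) (fun z hz => hcs z (by simp [hz]))
          (fun z hz => hseg z (by simp [hz])) hpre']
        simp

-- A's pattern scan agrees with B's compound scan, pattern by pattern
theorem findAgree : ∀ (ps : List (String × String)) (cs : List (List (List Char))),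
    List.Forall₂ (fun (q : String × String) c =>
      q.1.toList = joinU c ∧ c ≠ [] ∧ ∀ x ∈ c, x ≠ [] ∧ '_' ∉ x) ps cs →
    ∀ (segs : List (List Char)) (t : Bool), (∀ s ∈ segs, '_' ∉ s) →
    aFindCompound ps (rep segs t)
      = (bFindComp cs segs).map (fun c => (String.ofList (joinU c), rep (segs.drop c.length) t)) := by
  intro ps cs hrel
  induction hrel with
  | nil => intro segs t hseg; simp [aFindCompound, bFindComp]
  | @cons q c ps' cs' hqc hrest ih =>
    intro segs t hseg
    obtain ⟨hq, hcne, hcseg⟩ := hqc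
    obtain ⟨p0, p1⟩ := q
    simp only at hq
    have hiff := comp_match_iff c segs t hcne hcseg hseg
    simp only [aFindCompound, bFindComp]
    rw [hq]
    by_cases hpre : c <+: segs
    · have hm := hiff.mpr hpre
      rw [if_pos hm.1, if_pos hm.2, if_pos hpre]
      rw [comp_match_tail c segs t hcne hcseg hseg hpre]
      have hp0 : p0 = String.ofList (joinU c) := by
        rw [← hq]; simp
      rw [hp0]
      rfl
    · have hm := fun hand => hpre (hiff.mp hand)
      by_cases hp1 : joinU c <+: rep segs t
      · rw [if_pos hp1, if_neg (fun hb => hm ⟨hp1, hb⟩), if_neg hpre]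
        exact ih segs t hseg
      · rw [if_neg hp1, if_neg hpre]
        exact ih segs t hseg

-- the two literal compound tables correspond
theorem hrel_clip : List.Forall₂ (fun (q : String × String) c =>
    q.1.toList = joinU c ∧ c ≠ [] ∧ ∀ x ∈ c, x ≠ [] ∧ '_' ∉ x) clipCompoundTokens compoundSegs := by
  repeat first
    | exact List.Forall₂.nil
    | refine List.Forall₂.cons (by decide) ?_

theorem aLoop_nil : aLoop [] = [] := by
  rw [aLoop]; simp

theorem aLoop_some (rem : List Char) (pat : String) (rem' : List Char) (h0 : rem ≠ [])
    (h : aFindCompound clipCompoundTokens rem = some (pat, rem')) :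
    aLoop rem = pat :: aLoop rem' := by
  rw [aLoop, dif_neg h0]
  split
  · rename_i pat2 rem2 heq
    rw [h] at heq
    cases heq
    rfl
  · rename_i heq
    rw [h] at heq
    cases heq

theorem aLoop_none (rem : List Char) (h0 : rem ≠ [])
    (h : aFindCompound clipCompoundTokens rem = none) :
    aLoop rem = if '_' ∈ rem then
        String.ofList (rem.takeWhile (· ≠ '_')) :: aLoop ((rem.dropWhile (· ≠ '_')).tail)
      else [String.ofList rem] := by
  rw [aLoop, dif_neg h0]
  split
  · rename_i pat2 rem2 heq
    rw [h] at heq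
    cases heq
  · rfl

theorem bWalk_nil : bWalk [] = [] := by
  rw [bWalk]

theorem bWalk_some (s : List Char) (rest : List (List Char)) (c : List (List Char))
    (h : bFindComp compoundSegs (s :: rest) = some c) :
    bWalk (s :: rest) = String.ofList (PySem.Chars.join ['_'] c) :: bWalk ((s :: rest).drop c.length) := by
  rw [bWalk]
  split
  · rename_i c2 heq
    rw [h] at heq
    cases heq
    rfl
  · rename_i heq
    rw [h] at heq
    cases heq

theorem bWalk_none (s : List Char) (rest : List (List Char))
    (h : bFindComp compoundSegs (s :: rest) = none) :
    bWalk (s :: rest) = String.ofList s :: bWalk rest := by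
  rw [bWalk]
  split
  · rename_i c2 heq
    rw [h] at heq
    cases heq
  · rfl

-- the heart: A's loop on the joined representation computes B's segment walk
theorem mainEqAux : ∀ (n : Nat) (segs : List (List Char)) (t : Bool), segs.length ≤ n →
    (∀ s ∈ segs, '_' ∉ s) → (t = true ∨ segs.getLast? ≠ some []) →
    aLoop (rep segs t) = bWalk segs := by
  intro n
  induction n with
  | zero =>
    intro segs t hlen _ _
    have : segs = [] := List.eq_nil_of_length_eq_zero (Nat.le_zero.mp hlen)
    rw [this, rep_nil, aLoop_nil, bWalk_nil]
  | succ n ihn =>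
    intro segs t hlen hseg ht
    cases segs with
    | nil => rw [rep_nil, aLoop_nil, bWalk_nil]
    | cons s rest =>
    have hs : '_' ∉ s := hseg s (by simp)
    have hrne : rep (s :: rest) t ≠ [] := by
      rw [rep_cons]
      intro hnil
      obtain ⟨hsnil, hite⟩ := List.append_eq_nil_iff.mp hnil
      have hre : rest = [] ∧ t = false := by
        by_contra hre
        rw [if_neg hre] at hite
        exact List.cons_ne_nil _ _ hite
      rcases ht with ht | ht
      · rw [ht] at hre; exact Bool.noConfusion hre.2
      · rw [hsnil, hre.1] at ht; exact ht rfl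
    have hAgree := findAgree _ _ hrel_clip (s :: rest) t hseg
    have htdrop : ∀ (k : Nat), t = true ∨ (((s :: rest).drop k).getLast? ≠ some []) := by
      intro k
      rcases ht with ht | ht
      · exact Or.inl ht
      · refine Or.inr ?_
        rw [List.getLast?_drop]
        split
        · simp
        · exact ht
    cases hb : bFindComp compoundSegs (s :: rest) with
    | some c =>
      rw [hb] at hAgree
      simp only [Option.map_some] at hAgree
      obtain ⟨hmem, hcpre⟩ := bFindComp_mem _ _ _ hb
      have hc : c ≠ [] := (by decide : ∀ x ∈ compoundSegs, x ≠ []) c hmem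
      rw [aLoop_some _ _ _ hrne hAgree, bWalk_some _ _ _ hb]
      congr 1
      have hc1 : 1 ≤ c.length := by
        cases hL : c with
        | nil => exact absurd hL hc
        | cons a l => simp
      refine ihn ((s :: rest).drop c.length) t ?_
        (fun z hz => hseg z (List.mem_of_mem_drop hz)) (htdrop c.length)
      simp only [List.length_drop, List.length_cons]
      simp only [List.length_cons] at hlen
      omega
    | none =>
      rw [hb] at hAgree
      simp only [Option.map_none] at hAgree
      rw [aLoop_none _ hrne hAgree, bWalk_none _ _ hb, rep_cons]
      have hr := rep_cons_shape rest t
      obtain ⟨htake, hdropw⟩ := takeWhile_seg s _ hs hr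
      by_cases hmem : '_' ∈ s ++ (if rest = [] ∧ t = false then [] else '_' :: rep rest t)
      · rw [if_pos hmem, htake, hdropw]
        have hre : ¬ (rest = [] ∧ t = false) := by
          intro hre
          rw [if_pos hre, List.append_nil] at hmem
          exact hs hmem
        rw [if_neg hre, List.tail_cons]
        congr 1
        refine ihn rest t ?_ (fun z hz => hseg z (by simp [hz])) (htdrop 1)
        simp only [List.length_cons] at hlen
        omega
      · rw [if_neg hmem]
        have hre : rest = [] ∧ t = false := by
          by_contra hre
          rw [if_neg hre] at hmem
          exact hmem (by simp)
        rw [if_pos hre, hre.1, List.append_nil, bWalk_nil]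

theorem mainEq (segs : List (List Char)) (t : Bool) (hseg : ∀ s ∈ segs, '_' ∉ s)
    (ht : t = true ∨ segs.getLast? ≠ some []) : aLoop (rep segs t) = bWalk segs :=
  mainEqAux segs.length segs t le_rfl hseg ht

-- ===== VERDICT (by name: the statement is the Claim_ definition above) =====
theorem tokenize_clip_lora_path_py_spec : Claim_equal_tokenize_clip_lora_path_py := by
  intro path _
  unfold Spec_tokenize_clip_lora_path_py tokenize_clip_lora_path_py tokenize_clip_lora_path_py_alt
  by_cases hp : path = ""
  · subst hp
    rw [if_pos rfl]
    have h0 : ("" : String).toList = [] := rfl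
    rw [h0, aLoop_nil]
  · rw [if_neg hp]
    have hcs : path.toList ≠ [] := fun h => hp (String.toList_eq_nil_iff.mp h)
    rw [splitOn_eq_splitU]
    show aLoop path.toList = bWalk (if PySem.Chars.endswith path.toList ['_'] = true
      then (splitU path.toList).dropLast else splitU path.toList)
    by_cases he : PySem.Chars.endswith path.toList ['_'] = true
    · rw [if_pos he]
      obtain ⟨front, hfront⟩ := (PySem.Chars.endswith_iff _ _).mp he
      rw [← hfront, splitU_concat_us, List.dropLast_concat]
      have hrep : rep (splitU front) true = front ++ ['_'] := by
        rw [rep, joinU_splitU, if_pos ⟨splitU_ne_nil front, rfl⟩]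
      rw [← hrep]
      exact mainEq _ true (splitU_no_us front) (Or.inl rfl)
    · rw [if_neg he]
      have hns : ¬ ['_'] <:+ path.toList := fun h => he ((PySem.Chars.endswith_iff _ _).mpr h)
      have hrep : rep (splitU path.toList) false = path.toList := by
        rw [rep, joinU_splitU]; simp
      conv_lhs => rw [← hrep]
      exact mainEq _ false (splitU_no_us _) (Or.inr (splitU_getLast _ hcs hns))
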